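-- pv_equiv track=rewrite | github.com/inaciovasquez2020/pachner-invariant | tools/verify_bounded_g2_rank_cert.py | boundary_rows
-- ===== SOURCE A (Python) =====
-- from typing import Any
--
-- def boundary_rows(vertices: list[Any], edges: list[dict[str, Any]]) -> list[int]:
--     v_count = len(vertices)
--     rows = [0 for _ in range(v_count)]
--     for j, e in enumerate(edges):
--         source = e["source"]
--         target = e["target"]
--         if not isinstance(source, int) or not isinstance(target, int):
--             raise AssertionError(f"edge {j} source/target must be integer indices")
--         if source < 0 or source >= v_count:
--             raise AssertionError(f"edge {j} source out of range")
--         if target < 0 or target >= v_count: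
--             raise AssertionError(f"edge {j} target out of range")
--         if source == target:
--             raise AssertionError(f"edge {j} is degenerate self-loop")
--         rows[source] ^= 1 << j
--         rows[target] ^= 1 << j
--     return rows
-- ===== SOURCE B (Python) =====
-- def boundary_rows(vertices, edges):
--     v_count = len(vertices)
--     # pass 1: validate every edge (identical errors in identical order)
--     for j, e in enumerate(edges):
--         source = e["source"]
--         target = e["target"]
--         if not isinstance(source, int) or not isinstance(target, int):
--             raise AssertionError(f"edge {j} source/target must be integer indices")
--         if source < 0 or source >= v_count:
--             raise AssertionError(f"edge {j} source out of range")
--         if target < 0 or target >= v_count: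
--             raise AssertionError(f"edge {j} target out of range")
--         if source == target:
--             raise AssertionError(f"edge {j} is degenerate self-loop")
--     # pass 2: for each vertex, gather its row directly by scanning the edges
--     return [sum(1 << j for j, e in enumerate(edges)
--                 if e["source"] == v or e["target"] == v)
--             for v in range(v_count)]
-- ===== Notes on version B (the rewrite author's own statement) =====
-- stated objective: alternative
-- what changed: A scatters XOR bit-toggles into the rows while scanning the edges once; B first validates all edges, then builds each row independently by a per-vertex scan of the edges summing the bits of incident edges (gather instead of scatter, O(V*E) instead of O(E) row updates).
import Mathlib
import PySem

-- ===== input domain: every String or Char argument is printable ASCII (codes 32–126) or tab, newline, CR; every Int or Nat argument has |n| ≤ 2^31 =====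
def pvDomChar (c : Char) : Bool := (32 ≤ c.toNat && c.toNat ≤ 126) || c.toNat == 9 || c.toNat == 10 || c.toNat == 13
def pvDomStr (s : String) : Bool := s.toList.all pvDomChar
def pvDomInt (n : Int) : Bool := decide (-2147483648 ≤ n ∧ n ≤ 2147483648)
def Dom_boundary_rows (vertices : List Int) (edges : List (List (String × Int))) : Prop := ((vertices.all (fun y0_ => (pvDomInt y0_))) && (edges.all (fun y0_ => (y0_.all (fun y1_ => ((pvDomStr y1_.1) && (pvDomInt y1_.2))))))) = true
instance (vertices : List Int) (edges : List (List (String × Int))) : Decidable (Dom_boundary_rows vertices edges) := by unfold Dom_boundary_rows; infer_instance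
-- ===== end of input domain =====

-- B replaces A's single scatter pass (XOR bit-toggles into rows while scanning the edges) by a
-- validate-only first pass and then a per-vertex gather: each row is built independently by
-- scanning the edge list and summing the bits of incident edges (alternative decomposition).

-- ===== PORT A =====
-- the loop 'for j, e in enumerate(edges)': validation raising AssertionError = none
def brGoA (vCount : Int) : List (List (String × Int)) → Nat → List Int → Option (List Int)
  | [], _, rows => some rows
  | e :: rest, j, rows =>
    match (PySem.Dict.ofList e).get? "source", (PySem.Dict.ofList e).get? "target" with
    | some source, some target =>
      if source < 0 ∨ vCount ≤ source then none          -- AssertionError: source out of range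
      else if target < 0 ∨ vCount ≤ target then none     -- AssertionError: target out of range
      else if source = target then none                  -- AssertionError: degenerate self-loop
      else
        -- rows[source] ^= 1 << j ; rows[target] ^= 1 << j  (indices validated in range)
        let rows1 := rows.set source.toNat (Int.xor (rows.getD source.toNat 0) ((1:Int) <<< (j:Int)))
        let rows2 := rows1.set target.toNat (Int.xor (rows1.getD target.toNat 0) ((1:Int) <<< (j:Int)))
        brGoA vCount rest (j+1) rows2
    | _, _ => none                                       -- KeyError on e["source"] / e["target"]

def boundary_rows (vertices : List Int) (edges : List (List (String × Int))) : List Int :=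
  (brGoA (vertices.length : Int) edges 0 (List.replicate vertices.length 0)).getD []

-- ===== PORT B =====
-- pass 1: validate every edge; false = some AssertionError/KeyError was raised
def brValid (vCount : Int) : List (List (String × Int)) → Bool
  | [] => true
  | e :: rest =>
    match (PySem.Dict.ofList e).get? "source", (PySem.Dict.ofList e).get? "target" with
    | some source, some target =>
      if source < 0 ∨ vCount ≤ source then false
      else if target < 0 ∨ vCount ≤ target then false
      else if source = target then false
      else brValid vCount rest
    | _, _ => false

-- 'e["source"] == v or e["target"] == v' (both keys exist: pass 1 already validated them)
def edgeHitsB (v : Int) (e : List (String × Int)) : Bool :=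
  match (PySem.Dict.ofList e).get? "source", (PySem.Dict.ofList e).get? "target" with
  | some s, some t => s == v || t == v
  | _, _ => false

-- 'sum(1 << j for j, e in enumerate(edges) if …)'
def rowForB (edges : List (List (String × Int))) (v : Int) : Int :=
  (PySem.List.enumerate edges 0).foldl
    (fun acc je => if edgeHitsB v je.2 then acc + ((1:Int) <<< je.1) else acc) 0

-- pass 2: one row per vertex index v in range(v_count)
def boundary_rows_alt (vertices : List Int) (edges : List (List (String × Int))) : List Int :=
  if brValid (vertices.length : Int) edges then
    (PySem.List.pyRange 0 (vertices.length : Int) 1).map (fun v => rowForB edges v)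
  else []   -- Python B raises here; outside Pre_

-- ===== PRECONDITION & SPEC =====
-- Pre_ excludes exactly the inputs on which Python A raises: an edge dict missing the
-- "source"/"target" key (KeyError) or failing A's validation (AssertionError).
def edgeOKb (n : Int) (e : List (String × Int)) : Bool :=
  match (PySem.Dict.ofList e).get? "source", (PySem.Dict.ofList e).get? "target" with
  | some s, some t => decide (0 ≤ s) && decide (s < n) && decide (0 ≤ t) && decide (t < n) && decide (s ≠ t)
  | _, _ => false

def Pre_boundary_rows (vertices : List Int) (edges : List (List (String × Int))) : Prop :=
  edges.all (edgeOKb (vertices.length : Int)) = true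
instance (vertices : List Int) (edges : List (List (String × Int))) : Decidable (Pre_boundary_rows vertices edges) := by unfold Pre_boundary_rows; infer_instance

def pvWitness_boundary_rows : List Int × (List (List (String × Int))) :=
  ([5, 7, 9], [[("source", 0), ("target", 1)], [("source", 2), ("target", 0)]])

def Spec_boundary_rows (vertices : List Int) (edges : List (List (String × Int))) (out : List Int) : Prop := out = boundary_rows_alt vertices edges
instance (vertices : List Int) (edges : List (List (String × Int))) (out : List Int) : Decidable (Spec_boundary_rows vertices edges out) := by unfold Spec_boundary_rows; infer_instance

-- ===== CLAIM (what is proved, stated in full; the proofs are below) =====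
def Claim_equal_boundary_rows : Prop := ∀ (vertices : List Int) (edges : List (List (String × Int))), Dom_boundary_rows vertices edges → Pre_boundary_rows vertices edges → Spec_boundary_rows vertices edges (boundary_rows vertices edges)

-- ===== LEMMAS AND PROOFS =====

theorem nat_xor_two_pow {m j : Nat} (h : m < 2^j) : m ^^^ 2^j = m + 2^j := by
  apply Nat.eq_of_testBit_eq
  intro i
  rw [Nat.testBit_xor, Nat.add_comm m (2^j)]
  rcases lt_trichotomy i j with hij | rfl | hij
  · rw [Nat.testBit_two_pow_of_ne (by omega), Nat.testBit_two_pow_add_gt hij]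
    simp
  · rw [Nat.testBit_two_pow_self, Nat.testBit_two_pow_add_eq, Nat.testBit_lt_two_pow h]
    rfl
  · rw [Nat.testBit_two_pow_of_ne (by omega),
      Nat.testBit_lt_two_pow (show m < 2^i from lt_of_lt_of_le h (Nat.pow_le_pow_right (by norm_num) (by omega))),
      Nat.testBit_lt_two_pow (show 2^j + m < 2^i by
        have h2 : 2^j + 2^j ≤ 2^i := by
          rw [← two_mul, ← pow_succ']
          exact Nat.pow_le_pow_right (by norm_num) (by omega)
        omega)]
    rfl

theorem int_xor_shift {x : Int} {j : Nat} (h0 : 0 ≤ x) (h1 : x < (2:Int)^j) :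
    Int.xor x ((1:Int) <<< (j:Int)) = x + (2:Int)^j := by
  obtain ⟨m, rfl⟩ := Int.eq_ofNat_of_zero_le h0
  rw [Int.one_shiftLeft]
  have hm : m < 2^j := by exact_mod_cast h1
  have : Int.xor (m : Int) ((2^j : Nat) : Int) = ((m ^^^ 2^j : Nat) : Int) := rfl
  rw [this, nat_xor_two_pow hm]
  push_cast; ring

theorem one_shiftLeft_nat (j : Nat) : (1:Int) <<< ((j:Nat):Int) = (2:Int)^j := by
  rw [Int.one_shiftLeft]; push_cast; ring

theorem getD_set {α : Type} (l : List α) (i v : Nat) (x d : α) :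
    (l.set i x).getD v d = if i = v ∧ i < l.length then x else l.getD v d := by
  by_cases h : i = v ∧ i < l.length
  · obtain ⟨rfl, hlt⟩ := h
    simp [List.getD_eq_getElem?_getD, hlt]
  · rw [if_neg h]
    by_cases hiv : i = v
    · subst hiv
      have : l.length ≤ i := by omega
      simp [List.getD_eq_getElem?_getD, List.set_eq_of_length_le this]
    · simp [List.getD_eq_getElem?_getD, List.getElem?_set_ne hiv]

-- row contribution of the edges from index j on, incident to vertex v
def sumFrom (v : Int) : List (List (String × Int)) → Nat → Int
  | [], _ => 0
  | e :: rest, j => (if edgeHitsB v e then (2:Int)^j else 0) + sumFrom v rest (j+1)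

theorem foldl_enum_sumFrom (v : Int) :
    ∀ (l : List (List (String × Int))) (j : Nat) (acc : Int),
    (PySem.List.enumerate l (j:Int)).foldl
      (fun acc je => if edgeHitsB v je.2 then acc + ((1:Int) <<< je.1) else acc) acc
    = acc + sumFrom v l j := by
  intro l
  induction l with
  | nil => intro j acc; simp [PySem.List.enumerate_nil, sumFrom]
  | cons e rest ih =>
    intro j acc
    rw [PySem.List.enumerate_cons, List.foldl_cons]
    have : ((j:Int) + 1) = ((j+1 : Nat) : Int) := by push_cast; ring
    rw [this, ih (j+1)]
    simp only [sumFrom, one_shiftLeft_nat]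
    split_ifs <;> ring

theorem goA_eq (n : Nat) :
    ∀ (edges : List (List (String × Int))) (j : Nat) (rows : List Int),
    rows.length = n →
    brValid (n:Int) edges = true →
    (∀ v : Nat, 0 ≤ rows.getD v 0 ∧ rows.getD v 0 < (2:Int)^j) →
    ∃ rows', brGoA (n:Int) edges j rows = some rows' ∧ rows'.length = n ∧
      ∀ v : Nat, v < n → rows'.getD v 0 = rows.getD v 0 + sumFrom (v:Int) edges j := by
  intro edges
  induction edges with
  | nil =>
    intro j rows hlen _ _
    exact ⟨rows, rfl, hlen, fun v _ => by simp [sumFrom]⟩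
  | cons e rest ih =>
    intro j rows hlen hval hinv
    simp only [brValid] at hval
    simp only [brGoA]
    cases hs : (PySem.Dict.ofList e).get? "source" with
    | none => rw [hs] at hval; simp at hval
    | some source =>
      cases ht : (PySem.Dict.ofList e).get? "target" with
      | none => rw [hs, ht] at hval; simp at hval
      | some target =>
        rw [hs, ht] at hval
        dsimp only at hval
        by_cases c1 : source < 0 ∨ (n:Int) ≤ source
        · rw [if_pos c1] at hval; simp at hval
        by_cases c2 : target < 0 ∨ (n:Int) ≤ target
        · rw [if_neg c1, if_pos c2] at hval; simp at hval
        by_cases c3 : source = target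
        · rw [if_neg c1, if_neg c2, if_pos c3] at hval; simp at hval
        rw [if_neg c1, if_neg c2, if_neg c3] at hval
        dsimp only
        simp only [if_neg c1, if_neg c2, if_neg c3]
        have hsnn : 0 ≤ source := by omega
        have htnn : 0 ≤ target := by omega
        have hslt : source.toNat < n := by omega
        have htlt : target.toNat < n := by omega
        have hst : source.toNat ≠ target.toNat := by omega
        obtain ⟨h0s, hbs⟩ := hinv source.toNat
        obtain ⟨h0t, hbt⟩ := hinv target.toNat
        set rows1 := rows.set source.toNat (Int.xor (rows.getD source.toNat 0) ((1:Int) <<< (j:Int))) with hr1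
        set rows2 := rows1.set target.toNat (Int.xor (rows1.getD target.toNat 0) ((1:Int) <<< (j:Int))) with hr2
        have hlen2 : rows2.length = n := by simp [hr2, hr1, hlen]
        have hget2 : ∀ v : Nat, rows2.getD v 0 =
            rows.getD v 0 + (if edgeHitsB (v:Int) e then (2:Int)^j else 0) := by
          intro v
          have hhit : edgeHitsB (v:Int) e = (source == (v:Int) || target == (v:Int)) := by
            simp [edgeHitsB, hs, ht]
          rw [hr2, getD_set, hr1, getD_set, getD_set]
          have hl1 : rows1.length = rows.length := by simp [hr1]
          rw [hl1, hlen]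
          by_cases cvt : target.toNat = v
          · subst cvt
            rw [if_pos ⟨rfl, htlt⟩, if_neg (fun h => hst h.1),
              int_xor_shift h0t hbt, hhit]
            have : (target == ((target.toNat : Nat) : Int)) = true := by
              simp; omega
            rw [this]
            simp
          · rw [if_neg (fun h => cvt h.1)]
            by_cases cvs : source.toNat = v
            · subst cvs
              rw [if_pos ⟨rfl, by omega⟩, int_xor_shift h0s hbs, hhit]
              have : (source == ((source.toNat : Nat) : Int)) = true := by simp; omega
              rw [this]
              simp
            · rw [if_neg (fun h => cvs h.1), hhit]
              have h1 : (source == ((v:Nat) : Int)) = false := by simp; omega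
              have h2 : (target == ((v:Nat) : Int)) = false := by simp; omega
              rw [h1, h2]
              simp
        have hinv2 : ∀ v : Nat, 0 ≤ rows2.getD v 0 ∧ rows2.getD v 0 < (2:Int)^(j+1) := by
          intro v
          obtain ⟨h0, hb⟩ := hinv v
          have hpow : (0:Int) < (2:Int)^j := pow_pos (by norm_num) j
          rw [hget2 v, pow_succ]
          split_ifs <;> constructor <;> omega
        obtain ⟨rows', hgo, hlen', hget'⟩ := ih (j+1) rows2 hlen2 hval hinv2
        refine ⟨rows', hgo, hlen', fun v hv => ?_⟩
        rw [hget' v hv, hget2 v]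
        simp only [sumFrom]
        ring

theorem pre_valid (n : Int) :
    ∀ (edges : List (List (String × Int))),
    edges.all (edgeOKb n) = true → brValid n edges = true := by
  intro edges
  induction edges with
  | nil => intro _; rfl
  | cons e rest ih =>
    intro h
    rw [List.all_cons, Bool.and_eq_true] at h
    obtain ⟨he, hrest⟩ := h
    simp only [brValid]
    unfold edgeOKb at he
    cases hs : (PySem.Dict.ofList e).get? "source" with
    | none => rw [hs] at he; simp at he
    | some s =>
      cases ht : (PySem.Dict.ofList e).get? "target" with
      | none => rw [hs, ht] at he; simp at he
      | some t =>
        rw [hs, ht] at he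
        simp only [Bool.and_eq_true, decide_eq_true_eq] at he
        obtain ⟨⟨⟨⟨h1, h2⟩, h3⟩, h4⟩, h5⟩ := he
        dsimp only
        rw [if_neg (by omega), if_neg (by omega), if_neg h5]
        exact ih hrest

-- ===== VERDICT (by name: the statement is the Claim_ definition above) =====
theorem boundary_rows_spec : Claim_equal_boundary_rows := by
  intro vertices edges _ hpre
  unfold Spec_boundary_rows boundary_rows boundary_rows_alt
  have hval := pre_valid (vertices.length : Int) edges hpre
  rw [if_pos hval]
  obtain ⟨rows', hgo, hlen', hget'⟩ :=
    goA_eq vertices.length edges 0 (List.replicate vertices.length 0) (by simp) hval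
      (fun v => by by_cases hv : v < vertices.length <;>
        simp [List.getD_eq_getElem?_getD, hv])
  rw [hgo]
  simp only [Option.getD_some]
  apply List.ext_getElem
  · rw [hlen', List.length_map, PySem.List.length_pyRange_one]
    simp
  · intro k h1 h2
    rw [List.getElem_map, PySem.List.getElem_pyRange_one]
    have hk : k < vertices.length := by
      have := h2
      rw [List.length_map, PySem.List.length_pyRange_one] at this
      omega
    have := hget' k hk
    rw [List.getD_eq_getElem?_getD, List.getElem?_eq_getElem h1] at this
    simp only [Option.getD_some] at this
    rw [this]
    have hz : ((0:Int) + (k:Int)) = ((k:Nat):Int) := by omega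
    rw [hz]
    unfold rowForB
    have := foldl_enum_sumFrom ((k:Nat):Int) edges 0 0
    simp only [Nat.cast_zero] at this
    rw [this]
    by_cases hv : k < vertices.length <;>
      simp [List.getD_eq_getElem?_getD, hv]
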